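-- pv_equiv track=rewrite | github.com/wzygxr/shuati | class122_GreedyAlgorithm/Code32_MonotoneIncreasingDigits.py | is_monotone_increasing
-- ===== SOURCE A (Python) =====
-- def is_monotone_increasing(num: int) -> bool:
--     """
--     验证数字是否单调递增
--
--     Args:
--         num: 要验证的数字
--
--     Returns:
--         bool: 是否单调递增
--     """
--     if num < 10:
--         return True
--
--     s = str(num)
--     for i in range(1, len(s)):
--         if s[i] < s[i - 1]:
--             return False
--     return True
-- ===== SOURCE B (Python) =====
-- def is_monotone_increasing(num: int) -> bool:
--     if num < 10:
--         return True
--     s = str(num)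
--     return s == ''.join(sorted(s))
-- ===== Notes on version B (the rewrite author's own statement) =====
-- stated objective: idiomatic
-- what changed: Replaces the adjacent-pair scan loop with a sort-then-compare: the digit string is non-decreasing iff it equals its sorted form.
import Mathlib
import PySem

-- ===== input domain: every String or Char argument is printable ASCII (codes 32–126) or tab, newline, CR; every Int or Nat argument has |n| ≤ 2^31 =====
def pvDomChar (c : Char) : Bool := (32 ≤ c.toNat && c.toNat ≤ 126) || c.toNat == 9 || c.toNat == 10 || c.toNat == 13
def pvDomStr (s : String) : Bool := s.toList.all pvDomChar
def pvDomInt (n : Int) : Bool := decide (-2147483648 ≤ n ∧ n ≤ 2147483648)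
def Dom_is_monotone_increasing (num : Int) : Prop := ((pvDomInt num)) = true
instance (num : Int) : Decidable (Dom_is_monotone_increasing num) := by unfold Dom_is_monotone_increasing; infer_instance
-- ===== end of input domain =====

-- ===== PORT A =====
-- B replaces A's adjacent-pair scan with a sort-then-compare equality test (idiomatic, not faster).
-- loop of A: for i in range(1, len(s)): if s[i] < s[i-1]: return False  — structural recursion over adjacent pairs
def pvChkA : List Char → Bool
  | [] => true
  | [_] => true
  | a :: b :: t => if b < a then false else pvChkA (b :: t)

def is_monotone_increasing (num : Int) : Bool :=
  if num < 10 then true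
  else pvChkA (PySem.Int.toChars num)

-- ===== PORT B =====
def is_monotone_increasing_alt (num : Int) : Bool :=
  if num < 10 then true
  else
    let s := PySem.Int.toChars num
    decide (s = PySem.List.sorted s (fun c => c) false)

-- ===== PRECONDITION & SPEC =====
def Spec_is_monotone_increasing (num : Int) (out : Bool) : Prop := out = is_monotone_increasing_alt num
instance (num : Int) (out : Bool) : Decidable (Spec_is_monotone_increasing num out) := by unfold Spec_is_monotone_increasing; infer_instance

-- ===== CLAIM (what is proved, stated in full; the proofs are below) =====
def Claim_equal_is_monotone_increasing : Prop := ∀ (num : Int), Dom_is_monotone_increasing num → Spec_is_monotone_increasing num (is_monotone_increasing num)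

-- ===== LEMMAS AND PROOFS =====

theorem pvChkA_iff (s : List Char) : pvChkA s = true ↔ List.IsChain (· ≤ ·) s := by
  match s with
  | [] => simp [pvChkA]
  | [_] => simp [pvChkA]
  | a :: b :: t =>
    rw [pvChkA, List.isChain_cons_cons, ← pvChkA_iff (b :: t)]
    by_cases h : b < a
    · simp [h, not_le.mpr h]
    · simp [h, not_lt.mp h]

theorem sorted_id_eq_self_iff (s : List Char) :
    s = PySem.List.sorted s (fun c => c) false ↔ s.Pairwise (· ≤ ·) := by
  constructor
  · intro h
    have hp := PySem.List.sorted_pairwise (xs := s) (key := fun c : Char => c)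
    rw [← h] at hp
    exact hp
  · intro h
    exact (PySem.List.sorted_eq_self_of_pairwise s (fun c => c) h).symm

-- ===== VERDICT (by name: the statement is the Claim_ definition above) =====
theorem is_monotone_increasing_spec : Claim_equal_is_monotone_increasing := by
  intro num _
  unfold Spec_is_monotone_increasing is_monotone_increasing is_monotone_increasing_alt
  by_cases h : num < 10
  · simp [h]
  · simp only [h, if_false]
    rw [Bool.eq_iff_iff, decide_eq_true_iff, pvChkA_iff, List.isChain_iff_pairwise,
      sorted_id_eq_self_iff]
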